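-- pv_equiv track=rewrite | github.com/rebuilder945/FL_research | ast_research/python_code_5.23/lastterm_page7/success_code/王牧涵-3225-2023-05-06_11_11_02.py | work
-- ===== SOURCE A (Python) =====
-- def work(a) :
--     res = {}
--     factorial = 1
--     for i in range(a+1):
--         if i == 0:
--             res[i] = 1
--         else:
--             factorial *= i
--             res[i] = factorial
--     return res
-- ===== SOURCE B (Python) =====
-- import math
--
-- def work(a):
--     return {i: math.factorial(i) for i in range(a + 1)}
-- ===== Notes on version B (the rewrite author's own statement) =====
-- stated objective: idiomatic
-- what changed: Replaces A's stateful loop carrying a running-product accumulator (with a special-cased first iteration) by a stateless dict comprehension computing each value independently via math.factorial.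
import Mathlib
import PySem

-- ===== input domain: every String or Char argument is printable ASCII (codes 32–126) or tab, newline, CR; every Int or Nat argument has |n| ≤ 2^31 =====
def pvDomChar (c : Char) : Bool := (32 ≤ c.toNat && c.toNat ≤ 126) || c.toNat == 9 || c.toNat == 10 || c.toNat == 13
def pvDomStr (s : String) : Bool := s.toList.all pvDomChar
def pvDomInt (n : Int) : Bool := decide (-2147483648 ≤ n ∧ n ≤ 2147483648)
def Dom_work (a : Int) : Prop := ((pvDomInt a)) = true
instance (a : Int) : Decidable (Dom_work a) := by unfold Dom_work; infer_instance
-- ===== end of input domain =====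

-- B replaces A's running-product accumulator by a stateless per-key factorial computation (idiomatic; return value only).

-- ===== PORT A =====
-- literal port of A: dict built by a loop carrying the running product `factorial`
def work (a : Int) : List (Int × Int) :=
  let st := (PySem.List.pyRange 0 (a + 1) 1).foldl
    (fun (st : PySem.Dict Int Int × Int) i =>
      if i == 0 then (st.1.insert i 1, st.2)
      else
        let f := st.2 * i
        (st.1.insert i f, f))
    (PySem.Dict.empty, 1)
  st.1.items

-- ===== PORT B =====
-- literal port of B: each value computed independently as math.factorial(i)
def work_alt (a : Int) : List (Int × Int) :=
  (PySem.List.pyRange 0 (a + 1) 1).map (fun i => (i, (Nat.factorial i.toNat : Int)))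

-- ===== PRECONDITION & SPEC =====
def Spec_work (a : Int) (out : List (Int × Int)) : Prop := out = work_alt a
instance (a : Int) (out : List (Int × Int)) : Decidable (Spec_work a out) := by unfold Spec_work; infer_instance

-- ===== CLAIM (what is proved, stated in full; the proofs are below) =====
def Claim_equal_work : Prop := ∀ (a : Int), Dom_work a → Spec_work a (work a)

-- ===== LEMMAS AND PROOFS =====

-- loop invariant: after processing range(0, n) the dict's items are the final pairs
-- and the accumulator equals (n-1)!
theorem work_loop (n : Nat) :
    ((PySem.List.pyRange 0 (n : Int) 1).foldl
      (fun (st : PySem.Dict Int Int × Int) i =>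
        if i == 0 then (st.1.insert i 1, st.2)
        else
          let f := st.2 * i
          (st.1.insert i f, f))
      (PySem.Dict.empty, 1)).1.items
      = (PySem.List.pyRange 0 (n : Int) 1).map (fun i => (i, (Nat.factorial i.toNat : Int)))
    ∧ ((PySem.List.pyRange 0 (n : Int) 1).foldl
      (fun (st : PySem.Dict Int Int × Int) i =>
        if i == 0 then (st.1.insert i 1, st.2)
        else
          let f := st.2 * i
          (st.1.insert i f, f))
      (PySem.Dict.empty, 1)).2 = (Nat.factorial (n - 1) : Int) := by
  induction n with
  | zero => simp [PySem.List.pyRange_one_eq_nil (by omega : (0:Int) ≤ 0), Nat.factorial, PySem.Dict.empty]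
  | succ m ih =>
    obtain ⟨ih1, ih2⟩ := ih
    rw [show ((m + 1 : Nat) : Int) = (m : Int) + 1 by push_cast; ring,
        PySem.List.pyRange_one_succ_right (by positivity), List.foldl_append]
    set st := (PySem.List.pyRange 0 (m : Int) 1).foldl
      (fun (st : PySem.Dict Int Int × Int) i =>
        if i == 0 then (st.1.insert i 1, st.2)
        else
          let f := st.2 * i
          (st.1.insert i f, f))
      (PySem.Dict.empty, 1) with hst
    have hnotmem : st.1.contains (m : Int) = false := by
      have hkeys : st.1.keys = PySem.List.pyRange 0 (m : Int) 1 := by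
        simp only [PySem.Dict.keys, ih1, List.map_map, Function.comp_def, List.map_id']
      rw [← Bool.not_eq_true, PySem.Dict.contains_iff_mem_keys, hkeys,
          PySem.List.mem_pyRange_one]
      omega
    rcases Nat.eq_zero_or_pos m with hm | hm
    · subst hm
      simp only [List.foldl_cons, List.foldl_nil, Nat.cast_zero, beq_self_eq_true,
        if_true]
      refine ⟨?_, by simpa using ih2⟩
      rw [PySem.Dict.items_insert_of_not_contains _ _ (by simpa using hnotmem), ih1]
      simp [Nat.factorial]
    · have hne : ((m : Int) == 0) = false := by simp; omega
      simp only [List.foldl_cons, List.foldl_nil, hne, Bool.false_eq_true, if_false]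
      have hfact : st.2 * (m : Int) = (Nat.factorial m : Int) := by
        rw [ih2]
        rcases Nat.exists_eq_add_of_le hm with ⟨k, hk⟩
        subst hk
        simp [Nat.factorial_succ, Nat.add_comm 1 k]
        push_cast
        ring
      constructor
      · rw [PySem.Dict.items_insert_of_not_contains _ _ hnotmem, ih1, hfact]
        simp
      · simp [hfact]

-- ===== VERDICT (by name: the statement is the Claim_ definition above) =====
theorem work_spec : Claim_equal_work := by
  intro a _
  unfold Spec_work work work_alt
  rcases le_or_gt (a + 1) 0 with h | h
  · simp [PySem.List.pyRange_one_eq_nil h, PySem.Dict.empty]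
  · have hn : a + 1 = ((a + 1).toNat : Int) := by omega
    rw [hn]
    exact (work_loop (a + 1).toNat).1
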